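-- pv_equiv track=rewrite | github.com/moxiu2012/PJ_NLP | pj2_clfs_zhihu/sample_data.py | get_data_label_id
-- ===== SOURCE A (Python) =====
-- def get_data_label_id(label_datas):
--     """ 获取数据对应的标签id映射字典 """
--     label2id = {}
--     data_label_id = {}
--     for line in label_datas:
--         line = line.replace('\n', '')
--         data_id = line.split('\t')[0]
--         label_ids = line.split('\t')[1].split(',')
--
--         for label_id in label_ids:
--             label2id[label_id] = label2id.get(label_id, len(label2id))
--
--         label_ids = [label2id[label] for label in label_ids]
--         data_label_id[data_id] = label_ids
--
--     return data_label_id, label2id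
-- ===== SOURCE B (Python) =====
-- def _parse(line):
--     fields = line.replace('\n', '').split('\t')
--     return fields[0], fields[1].split(',')
--
--
-- def get_data_label_id(label_datas):
--     """ 获取数据对应的标签id映射字典 """
--     label2id = {}
--     for line in label_datas:
--         for label in _parse(line)[1]:
--             label2id.setdefault(label, len(label2id))
--     data_label_id = {}
--     for line in label_datas:
--         data_id, labels = _parse(line)
--         data_label_id[data_id] = [label2id[label] for label in labels]
--     return data_label_id, label2id
-- ===== Notes on version B (the rewrite author's own statement) =====
-- stated objective: alternative
-- what changed: Replaces A's single pass that interleaves label-id assignment with per-line id lookup by two separate linear passes: the first builds label2id with setdefault, the second builds data_label_id by looking ids up in the finished label2id (valid because an assigned id never changes).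
import Mathlib
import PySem

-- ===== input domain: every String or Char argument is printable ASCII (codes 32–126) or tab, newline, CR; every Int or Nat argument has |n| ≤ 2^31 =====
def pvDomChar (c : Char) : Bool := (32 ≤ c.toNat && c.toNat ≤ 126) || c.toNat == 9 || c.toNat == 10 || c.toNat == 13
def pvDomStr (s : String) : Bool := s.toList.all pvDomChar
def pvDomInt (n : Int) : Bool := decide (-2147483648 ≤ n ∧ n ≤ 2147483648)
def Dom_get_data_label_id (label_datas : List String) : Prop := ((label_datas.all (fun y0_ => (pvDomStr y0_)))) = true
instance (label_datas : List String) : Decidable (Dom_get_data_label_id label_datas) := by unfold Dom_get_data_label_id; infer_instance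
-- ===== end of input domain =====

set_option maxHeartbeats 400000


-- B replaces A's single interleaved pass by two linear passes (register all label ids first, then
-- build data_label_id from the finished label2id); equal because assigned ids never change.

-- ===== PORT A =====
-- split('\t') / split(',') have a nonempty separator, so PySem.Str.split? is always `some`; .getD [] is exact.
-- line.split('\t')[1] is the only place Python can raise (IndexError on a tab-less line): Pre_ excludes it,
-- pyGetD with default "" is used under that precondition.
def get_data_label_id (label_datas : List String) : (List (String × List Int)) × (List (String × Int)) :=
  let st := label_datas.foldl
    (fun (st : PySem.Dict String Int × PySem.Dict String (List Int)) line =>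
      let line := PySem.Str.replace line "\n" ""
      let data_id := PySem.List.pyGetD ((PySem.Str.split? line "\t").getD []) 0 ""
      let label_ids := (PySem.Str.split? (PySem.List.pyGetD ((PySem.Str.split? line "\t").getD []) 1 "") ",").getD []
      let label2id := label_ids.foldl (fun d l => d.insert l (d.getD l (d.size : Int))) st.1
      let ids := label_ids.map (fun l => label2id.getD l 0)
      (label2id, st.2.insert data_id ids))
    ((PySem.Dict.empty : PySem.Dict String Int), (PySem.Dict.empty : PySem.Dict String (List Int)))
  (st.2.items, st.1.items)

-- ===== PORT B =====
-- _parse(line) from Source B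
def pvParse (line : String) : String × List String :=
  let fields := (PySem.Str.split? (PySem.Str.replace line "\n" "") "\t").getD []
  (PySem.List.pyGetD fields 0 "",
   (PySem.Str.split? (PySem.List.pyGetD fields 1 "") ",").getD [])

def get_data_label_id_alt (label_datas : List String) : (List (String × List Int)) × (List (String × Int)) :=
  let label2id := label_datas.foldl
    (fun (d : PySem.Dict String Int) line =>
      (pvParse line).2.foldl (fun d label => d.setdefault label (d.size : Int)) d)
    PySem.Dict.empty
  let data_label_id := label_datas.foldl
    (fun (d : PySem.Dict String (List Int)) line =>
      let p := pvParse line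
      d.insert p.1 (p.2.map (fun label => label2id.getD label 0)))
    (PySem.Dict.empty : PySem.Dict String (List Int))
  (data_label_id.items, label2id.items)

-- ===== PRECONDITION & SPEC =====
-- Pre_ excludes exactly the inputs on which the Python raises IndexError: a line that (after removing
-- '\n') contains no tab, so that line.split('\t')[1] is out of range.
def Pre_get_data_label_id (label_datas : List String) : Prop :=
  ∀ line ∈ label_datas, 2 ≤ ((PySem.Str.split? (PySem.Str.replace line "\n" "") "\t").getD []).length
instance (label_datas : List String) : Decidable (Pre_get_data_label_id label_datas) := by
  unfold Pre_get_data_label_id; infer_instance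
def pvWitness_get_data_label_id : List String := ["d1\ta,b\n", "d2\tb,c"]

def Spec_get_data_label_id (label_datas : List String) (out : (List (String × List Int)) × (List (String × Int))) : Prop := out = get_data_label_id_alt label_datas
instance (label_datas : List String) (out : (List (String × List Int)) × (List (String × Int))) : Decidable (Spec_get_data_label_id label_datas out) := by unfold Spec_get_data_label_id; infer_instance

-- ===== CLAIM (what is proved, stated in full; the proofs are below) =====
def Claim_equal_get_data_label_id : Prop := ∀ (label_datas : List String), Dom_get_data_label_id label_datas → Pre_get_data_label_id label_datas → Spec_get_data_label_id label_datas (get_data_label_id label_datas)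

-- ===== LEMMAS AND PROOFS =====

-- A's per-label registration step and its fold over a line / over all lines
def pvRegA (d : PySem.Dict String Int) (l : String) : PySem.Dict String Int :=
  d.insert l (d.getD l (d.size : Int))
def pvRegLine (d : PySem.Dict String Int) (line : String) : PySem.Dict String Int :=
  (pvParse line).2.foldl pvRegA d
def pvRegAll (lines : List String) (d : PySem.Dict String Int) : PySem.Dict String Int :=
  lines.foldl pvRegLine d

lemma pvRegAll_nil (d : PySem.Dict String Int) : pvRegAll [] d = d := by
  simp only [pvRegAll, List.foldl_nil]
lemma pvRegAll_cons (line : String) (ls : List String) (d : PySem.Dict String Int) :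
    pvRegAll (line :: ls) d = pvRegAll ls ((pvParse line).2.foldl pvRegA d) := by
  simp only [pvRegAll, List.foldl_cons, pvRegLine]

-- list-level core of `insert k (getD k v) = setdefault k v` on a nodup-key dict
lemma pv_map_overwrite_self {κ ν : Type} [BEq κ] [LawfulBEq κ] :
    ∀ (l : List (κ × ν)), (l.map Prod.fst).Nodup → ∀ (k : κ) (c : ν),
      (PySem.Dict.mk l).get? k = some c →
      l.map (fun p => if p.1 == k then (k, c) else p) = l := by
  intro l
  induction l with
  | nil => intro _ k c h; simp
  | cons a l ih =>
    intro hnd k c hget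
    obtain ⟨a1, a2⟩ := a
    rw [PySem.Dict.get?_mk_cons] at hget
    simp only [List.map] at *
    by_cases hk : a1 == k
    · simp only [hk, if_pos] at hget ⊢
      have ha1 : a1 = k := eq_of_beq hk
      obtain rfl : c = a2 := by simpa [hk] using hget.symm
      subst ha1
      have hnotin : a1 ∉ l.map Prod.fst := (List.nodup_cons.mp hnd).1
      have : l.map (fun p => if p.1 == a1 then (a1, c) else p) = l := by
        apply List.map_congr_left ?_ |>.trans (List.map_id l)
        intro p hp
        have : p.1 ≠ a1 := by
          intro h; exact hnotin (by simpa [h] using List.mem_map_of_mem (f := Prod.fst) hp)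
        simp [this]
      simp [this]
    · simp only [hk] at hget ⊢
      simp only [Bool.false_eq_true, if_false]
      have := ih (List.nodup_cons.mp hnd).2 k c hget
      simp [this]

lemma pv_insert_getD_eq_setdefault {κ ν : Type} [BEq κ] [LawfulBEq κ]
    (d : PySem.Dict κ ν) (k : κ) (v : ν) (hnd : d.keys.Nodup) :
    d.insert k (d.getD k v) = d.setdefault k v := by
  by_cases hc : d.contains k = true
  · have hsome : ∃ c, d.get? k = some c := by
      rcases h : d.get? k with _ | c
      · exact absurd ((PySem.Dict.get?_eq_none_iff_contains d k).mp h) (by simp [hc])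
      · exact ⟨c, rfl⟩
    obtain ⟨c, hcval⟩ := hsome
    have hgd : d.getD k v = c := PySem.Dict.getD_of_get?_eq_some d v hcval
    unfold PySem.Dict.insert PySem.Dict.setdefault
    simp only [hc, if_pos, hgd]
    have : d.items.map (fun p => if p.1 == k then (k, c) else p) = d.items := by
      apply pv_map_overwrite_self d.items ?_ k c
      · rcases d with ⟨items⟩; exact hcval
      · rcases d with ⟨items⟩; exact hnd
    rcases d with ⟨items⟩
    simpa using this
  · have hgd : d.getD k v = v := PySem.Dict.getD_of_not_contains d v (by simpa using hc)
    unfold PySem.Dict.insert PySem.Dict.setdefault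
    simp [hc, hgd]

lemma pv_regA_nodup (d : PySem.Dict String Int) (l : String) (h : d.keys.Nodup) :
    (pvRegA d l).keys.Nodup := PySem.Dict.nodup_keys_insert d l _ h

lemma pv_foldl_regA_nodup (labels : List String) :
    ∀ (d : PySem.Dict String Int), d.keys.Nodup → (labels.foldl pvRegA d).keys.Nodup := by
  induction labels with
  | nil => intro d h; exact h
  | cons l ls ih => intro d h; exact ih _ (pv_regA_nodup d l h)

-- B's setdefault folds coincide with A's registration folds on nodup-key dicts
lemma pv_foldl_regB_eq (labels : List String) :
    ∀ (d : PySem.Dict String Int), d.keys.Nodup →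
      labels.foldl (fun d label => d.setdefault label (d.size : Int)) d = labels.foldl pvRegA d := by
  induction labels with
  | nil => intro d _; rfl
  | cons l ls ih =>
    intro d h
    have h1 : d.setdefault l (d.size : Int) = pvRegA d l :=
      (pv_insert_getD_eq_setdefault d l _ h).symm
    simp only [List.foldl_cons, h1]
    exact ih _ (pv_regA_nodup d l h)

lemma pv_label2id_B_eq (lines : List String) :
    ∀ (d : PySem.Dict String Int), d.keys.Nodup →
      lines.foldl (fun d line => (pvParse line).2.foldl (fun d label => d.setdefault label (d.size : Int)) d) d
        = pvRegAll lines d := by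
  induction lines with
  | nil => intro d _; rw [pvRegAll_nil]; rfl
  | cons line ls ih =>
    intro d h
    rw [pvRegAll_cons]
    simp only [List.foldl_cons]
    rw [pv_foldl_regB_eq _ d h]
    exact ih _ (pv_foldl_regA_nodup _ d h)

-- monotonicity: an assigned id is never changed by further registration
lemma pv_regA_mono {d : PySem.Dict String Int} {x : String} {v : Int} (l : String)
    (h : d.get? x = some v) : (pvRegA d l).get? x = some v := by
  by_cases hx : x = l
  · subst hx
    have : d.getD x (d.size : Int) = v := PySem.Dict.getD_of_get?_eq_some d _ h
    unfold pvRegA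
    rw [this]; exact PySem.Dict.get?_insert_self d x v
  · unfold pvRegA
    rw [PySem.Dict.get?_insert_of_ne d _ hx]; exact h

lemma pv_foldl_regA_mono (labels : List String) :
    ∀ {d : PySem.Dict String Int} {x : String} {v : Int},
      d.get? x = some v → (labels.foldl pvRegA d).get? x = some v := by
  induction labels with
  | nil => intro d x v h; exact h
  | cons l ls ih => intro d x v h; exact ih (pv_regA_mono l h)

lemma pv_regAll_mono (lines : List String) :
    ∀ {d : PySem.Dict String Int} {x : String} {v : Int},
      d.get? x = some v → (pvRegAll lines d).get? x = some v := by
  induction lines with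
  | nil => intro d x v h; rw [pvRegAll_nil]; exact h
  | cons line ls ih =>
    intro d x v h; rw [pvRegAll_cons]; exact ih (pv_foldl_regA_mono _ h)

-- every label of a line is assigned after that line is registered
lemma pv_foldl_regA_isSome (labels : List String) :
    ∀ (d : PySem.Dict String Int) (x : String), x ∈ labels →
      ∃ v, (labels.foldl pvRegA d).get? x = some v := by
  induction labels with
  | nil => intro d x hx; cases hx
  | cons l ls ih =>
    intro d x hx
    rcases List.mem_cons.mp hx with rfl | hx'
    · by_cases hmem : x ∈ ls
      · exact ih _ x hmem
      · refine ⟨d.getD x (d.size : Int), ?_⟩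
        simp only [List.foldl_cons]
        exact pv_foldl_regA_mono ls (by unfold pvRegA; exact PySem.Dict.get?_insert_self d x _)
    · exact ih _ x hx'

-- the main invariant: A's fold equals (final label2id, B-style data_label_id fold)
lemma pv_main (lines : List String) :
    ∀ (L : PySem.Dict String Int) (D : PySem.Dict String (List Int)),
      lines.foldl
        (fun (st : PySem.Dict String Int × PySem.Dict String (List Int)) line =>
          let L' := (pvParse line).2.foldl pvRegA st.1
          (L', st.2.insert (pvParse line).1 ((pvParse line).2.map (fun l => L'.getD l 0))))
        (L, D)
      = (pvRegAll lines L,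
         lines.foldl
           (fun (D' : PySem.Dict String (List Int)) line =>
             D'.insert (pvParse line).1 ((pvParse line).2.map (fun l => (pvRegAll lines L).getD l 0)))
           D) := by
  induction lines with
  | nil => intro L D; rw [pvRegAll_nil]; rfl
  | cons line ls ih =>
    intro L D
    rw [pvRegAll_cons]
    simp only [List.foldl_cons]
    rw [ih]
    have hids : (pvParse line).2.map (fun l => ((pvParse line).2.foldl pvRegA L).getD l 0)
        = (pvParse line).2.map (fun l => (pvRegAll ls ((pvParse line).2.foldl pvRegA L)).getD l 0) := by
      apply List.map_congr_left
      intro l hl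
      obtain ⟨v, hv⟩ := pv_foldl_regA_isSome (pvParse line).2 L l hl
      have hv' : (pvRegAll ls ((pvParse line).2.foldl pvRegA L)).get? l = some v := pv_regAll_mono ls hv
      rw [PySem.Dict.getD_of_get?_eq_some _ _ hv, PySem.Dict.getD_of_get?_eq_some _ _ hv']
    rw [hids]

lemma pv_A_unfold (lines : List String) :
    get_data_label_id lines =
      (let st := lines.foldl
        (fun (st : PySem.Dict String Int × PySem.Dict String (List Int)) line =>
          let L' := (pvParse line).2.foldl pvRegA st.1
          (L', st.2.insert (pvParse line).1 ((pvParse line).2.map (fun l => L'.getD l 0))))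
        (PySem.Dict.empty, PySem.Dict.empty)
       (st.2.items, st.1.items)) := by
  unfold get_data_label_id
  simp only [pvParse]
  rfl

-- ===== VERDICT (by name: the statement is the Claim_ definition above) =====
theorem get_data_label_id_spec : Claim_equal_get_data_label_id := by
  intro lines _ _
  unfold Spec_get_data_label_id
  rw [pv_A_unfold, pv_main]
  unfold get_data_label_id_alt
  have hL : lines.foldl
      (fun (d : PySem.Dict String Int) line =>
        (pvParse line).2.foldl (fun d label => d.setdefault label (d.size : Int)) d)
      PySem.Dict.empty = pvRegAll lines PySem.Dict.empty :=
    pv_label2id_B_eq lines PySem.Dict.empty (by simp [PySem.Dict.keys, PySem.Dict.empty])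
  simp only [hL]
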